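-- pv_equiv track=rewrite | github.com/qam1le/Pratybos | 5/5.py | fleisner
-- ===== SOURCE A (Python) =====
-- def fleisner(text, keys):
--     counter = 0
--     while counter != len(keys):
--         for key in keys:
--             for lofl in text: #lofl - list of lists
--                 right = lofl[1]
--                 F = (right|key)^((key//16)&right)
--                 lofl[1] = F
--                 lofl[0], lofl[1] = lofl[1], lofl[0] #apkeiciamos puses
--         counter += 1
--     return text
-- ===== SOURCE B (Python) =====
-- def fleisner(text, keys):
--     # Returns a new list (does not mutate `text`, unlike the original).
--     k = len(keys)
--
--     def onepass(state):
--         a, b = state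
--         for key in keys:
--             a, b = (b | key) ^ ((key // 16) & b), a
--         return a, b
--
--     def transform(pair):
--         state = (pair[0], pair[1])
--         rest = pair[2:]
--         seen = {}
--         i = 0
--         while i < k:
--             if state in seen:
--                 p = i - seen[state]
--                 for _ in range((k - i) % p):
--                     state = onepass(state)
--                 return [state[0], state[1]] + rest
--             seen[state] = i
--             state = onepass(state)
--             i += 1
--         return [state[0], state[1]] + rest
--
--     return [transform(pair) for pair in text]
-- ===== Notes on version B (the rewrite author's own statement) =====
-- stated objective: faster
-- what changed: Instead of sweeping the whole text len(keys) times (k full key-passes per element, k^2 steps each), B processes each pair independently, iterates the single full-key pass on its (left,right) state while recording seen states in a dict, and on the first repeat jumps ahead by (k-i) mod period, skipping almost all passes.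
-- outside the precondition, e.g. on fleisner([[1]], []): A returns [[1]], B raises IndexError
import Mathlib
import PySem

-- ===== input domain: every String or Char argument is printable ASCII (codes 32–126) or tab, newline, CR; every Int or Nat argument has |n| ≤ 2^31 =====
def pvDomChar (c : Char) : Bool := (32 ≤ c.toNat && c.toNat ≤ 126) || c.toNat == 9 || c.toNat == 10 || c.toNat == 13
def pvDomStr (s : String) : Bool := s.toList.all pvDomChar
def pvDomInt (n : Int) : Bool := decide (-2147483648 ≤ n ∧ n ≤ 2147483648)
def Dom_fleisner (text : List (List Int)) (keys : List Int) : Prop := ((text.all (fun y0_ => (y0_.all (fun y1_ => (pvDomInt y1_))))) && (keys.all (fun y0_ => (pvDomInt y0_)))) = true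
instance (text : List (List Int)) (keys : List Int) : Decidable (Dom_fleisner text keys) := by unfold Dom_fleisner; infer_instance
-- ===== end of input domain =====

-- B replaces A's k repeated full sweeps of the text by a per-element cycle-detecting
-- iteration of the single full-key pass (faster in a timing run); equivalence is
-- about the RETURN value only: A mutates `text` in place, B builds a new list.

-- ===== PORT A =====
-- one iteration of A's innermost body on one inner list: right = l[1]; F = (right|key)^((key//16)&right); l[1] = F; swap l[0],l[1]
def stepA (key : Int) (l : List Int) : List Int :=
  match l with
  | a :: b :: rest =>
      (PySem.Int.bxor (PySem.Int.bor b key) (PySem.Int.band (PySem.Int.floordiv key 16) b)) :: a :: rest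
  | _ => l   -- unreachable under Pre_ (Python raises IndexError here)

def fleisner (text : List (List Int)) (keys : List Int) : List (List Int) :=
  (List.range keys.length).foldl
    (fun t _ => keys.foldl (fun t key => t.map (stepA key)) t)
    text

-- ===== PORT B =====
def stepB (key : Int) (s : Int × Int) : Int × Int :=
  (PySem.Int.bxor (PySem.Int.bor s.2 key) (PySem.Int.band (PySem.Int.floordiv key 16) s.2), s.1)

-- onepass(state): one full pass of all keys over the (left, right) state
def onepassB (keys : List Int) (s : Int × Int) : Int × Int :=
  keys.foldl (fun s key => stepB key s) s

-- the `while i < k` loop of transform, with the seen-states dict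
def loopB (keys : List Int) (k : Nat) (i : Nat) (seen : PySem.Dict (Int × Int) Nat)
    (s : Int × Int) : Int × Int :=
  if h : i < k then
    match seen.get? s with
    | some j =>
        (List.range ((k - i) % (i - j))).foldl (fun s _ => onepassB keys s) s
    | none => loopB keys k (i + 1) (seen.insert s i) (onepassB keys s)
  else s
termination_by k - i

def fleisner_alt (text : List (List Int)) (keys : List Int) : List (List Int) :=
  text.map (fun pair =>
    match pair with
    | a :: b :: rest =>
        let s := loopB keys keys.length 0 PySem.Dict.empty (a, b)
        s.1 :: s.2 :: rest
    | _ => pair)   -- unreachable under Pre_ (Python raises IndexError here)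

-- ===== PRECONDITION & SPEC =====
-- Pre_ requires every inner list to have at least 2 elements (the pair shape the cipher
-- swaps): on shorter lists A raises IndexError whenever keys is nonempty, and only when
-- keys is empty does A accidentally return them untouched; B's per-pair extraction raises
-- there too, so those inputs are excluded.
def Pre_fleisner (text : List (List Int)) (keys : List Int) : Prop :=
  ∀ l ∈ text, 2 ≤ l.length
instance (text : List (List Int)) (keys : List Int) : Decidable (Pre_fleisner text keys) := by
  unfold Pre_fleisner; infer_instance

def pvWitness_fleisner : List (List Int) × List Int := ([[1, 2], [3, 4, 9]], [5, 19, -3])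

def Spec_fleisner (text : List (List Int)) (keys : List Int) (out : List (List Int)) : Prop :=
  out = fleisner_alt text keys
instance (text : List (List Int)) (keys : List Int) (out : List (List Int)) :
    Decidable (Spec_fleisner text keys out) := by unfold Spec_fleisner; infer_instance

-- ===== CLAIM (what is proved, stated in full; the proofs are below) =====
def Claim_equal_fleisner : Prop := ∀ (text : List (List Int)) (keys : List Int),
  Dom_fleisner text keys → Pre_fleisner text keys → Spec_fleisner text keys (fleisner text keys)

-- ===== LEMMAS AND PROOFS =====

-- a pass over the text commutes with map: fold of maps = map of folds
theorem foldl_map_eq_map_foldl (keys : List Int) (t : List (List Int)) :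
    keys.foldl (fun t key => t.map (stepA key)) t
      = t.map (fun l => keys.foldl (fun l key => stepA key l) l) := by
  induction keys generalizing t with
  | nil => simp
  | cons key ks ih =>
      simp only [List.foldl_cons]
      rw [ih, List.map_map]
      rfl

theorem foldl_range_eq_iterate {α : Type} (F : α → α) (r : Nat) (s : α) :
    (List.range r).foldl (fun s _ => F s) s = F^[r] s := by
  induction r generalizing s with
  | zero => simp
  | succ r ih =>
      rw [List.range_succ, List.foldl_append, List.foldl_cons, List.foldl_nil, ih,
          Function.iterate_succ_apply']

theorem map_iterate_eq_iterate_map {α : Type} (f : α → α) (n : Nat) (t : List α) :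
    (List.map f)^[n] t = t.map f^[n] := by
  induction n generalizing t with
  | zero => simp
  | succ n ih =>
      rw [Function.iterate_succ_apply, ih, List.map_map, Function.iterate_succ]

theorem fleisner_eq_map_iterate (text : List (List Int)) (keys : List Int) :
    fleisner text keys
      = text.map ((fun l => keys.foldl (fun l key => stepA key l) l)^[keys.length]) := by
  unfold fleisner
  rw [foldl_range_eq_iterate (fun t : List (List Int) => keys.foldl (fun t key => t.map (stepA key)) t)]
  have hpass : (fun t => keys.foldl (fun t key => t.map (stepA key)) t)
      = List.map (fun l => keys.foldl (fun l key => stepA key l) l) :=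
    funext fun t => foldl_map_eq_map_foldl keys t
  rw [hpass, map_iterate_eq_iterate_map]

-- per-element: a full key pass on a::b::rest is onepassB on (a,b)
theorem pass_cons (keys : List Int) (a b : Int) (rest : List Int) :
    keys.foldl (fun l key => stepA key l) (a :: b :: rest)
      = (onepassB keys (a, b)).1 :: (onepassB keys (a, b)).2 :: rest := by
  induction keys generalizing a b with
  | nil => simp [onepassB]
  | cons key ks ih =>
      simp only [List.foldl_cons, onepassB] at *
      exact ih _ _

theorem iterate_pass_cons (keys : List Int) (n : Nat) (a b : Int) (rest : List Int) :
    (fun l => keys.foldl (fun l key => stepA key l) l)^[n] (a :: b :: rest)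
      = ((onepassB keys)^[n] (a, b)).1 :: ((onepassB keys)^[n] (a, b)).2 :: rest := by
  induction n generalizing a b with
  | zero => simp
  | succ n ih =>
      rw [Function.iterate_succ_apply, Function.iterate_succ_apply, pass_cons, ih]

theorem iterate_cycle {α : Type} (F : α → α) (s : α) (p : Nat)
    (hcyc : F^[p] s = s) (q : Nat) : F^[p * q] s = s := by
  induction q with
  | zero => simp
  | succ q ih => rw [Nat.mul_succ, Function.iterate_add_apply, hcyc, ih]

theorem iterate_mod {α : Type} (F : α → α) (s : α) (p : Nat)
    (hcyc : F^[p] s = s) (m : Nat) : F^[m] s = F^[m % p] s := by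
  conv_lhs => rw [← Nat.mod_add_div m p]
  rw [Function.iterate_add_apply, iterate_cycle F s p hcyc]

def InvB (keys : List Int) (seen : PySem.Dict (Int × Int) Nat) (i : Nat) (s : Int × Int) : Prop :=
  ∀ s' j, seen.get? s' = some j → j < i ∧ (onepassB keys)^[i - j] s' = s

theorem loopB_correct (keys : List Int) (k : Nat) :
    ∀ n i seen s, k - i = n → InvB keys seen i s →
      loopB keys k i seen s = (onepassB keys)^[k - i] s := by
  intro n
  induction n with
  | zero =>
      intro i seen s hn _
      rw [loopB]
      have : ¬ i < k := by omega
      simp [this, hn]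
  | succ n ih =>
      intro i seen s hn hinv
      have hik : i < k := by omega
      rw [loopB]
      simp only [hik, dif_pos]
      cases hget : seen.get? s with
      | some j =>
          obtain ⟨hj, hcyc⟩ := hinv s j hget
          show (List.range ((k - i) % (i - j))).foldl (fun s _ => onepassB keys s) s
              = (onepassB keys)^[k - i] s
          rw [foldl_range_eq_iterate, ← iterate_mod (onepassB keys) s (i - j) hcyc]
      | none =>
          show loopB keys k (i + 1) (seen.insert s i) (onepassB keys s)
              = (onepassB keys)^[k - i] s
          rw [ih (i + 1) (seen.insert s i) (onepassB keys s) (by omega) ?_]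
          · have : k - i = (k - (i + 1)) + 1 := by omega
            rw [this, Function.iterate_succ_apply]
          · intro s' j hget'
            rw [PySem.Dict.get?_insert] at hget'
            by_cases hs : s' = s
            · simp [hs] at hget'
              subst hs; subst hget'
              exact ⟨by omega, by simp⟩
            · simp [hs] at hget'
              obtain ⟨hj, hit⟩ := hinv s' j hget'
              refine ⟨by omega, ?_⟩
              have : i + 1 - j = (i - j) + 1 := by omega
              rw [this, Function.iterate_succ_apply', hit]

-- ===== VERDICT (by name: the statement is the Claim_ definition above) =====
theorem fleisner_spec : Claim_equal_fleisner := by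
  intro text keys _ hpre
  unfold Spec_fleisner fleisner_alt
  rw [fleisner_eq_map_iterate]
  apply List.map_congr_left
  intro l hl
  have h2 := hpre l hl
  match l with
  | a :: b :: rest =>
      simp only
      rw [iterate_pass_cons,
          loopB_correct keys keys.length keys.length 0 PySem.Dict.empty (a, b) rfl
            (by intro s' j h; simp [PySem.Dict.get?_empty] at h)]
      simp
  | [] => simp at h2
  | [_] => simp at h2
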